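-- pv_equiv track=rewrite | github.com/prempyla/collabrate- | flight_route_check.py | solve
-- ===== SOURCE A (Python) =====
-- def solve(n, edges):
--     g = [[] for _ in range(n+1)]
--     rg = [[] for _ in range(n+1)]  # reversed graph
--
--     for a, b in edges:
--         g[a].append(b)
--         rg[b].append(a)
--
--     def dfs(start, graph):
--         visited = [False] * (n + 1)
--         stack = [start]
--         visited[start] = True
--
--         while stack:
--             u = stack.pop()
--             for v in graph[u]:
--                 if not visited[v]:
--                     visited[v] = True
--                     stack.append(v)
--         return visited
--
--     visited1 = dfs(1, g)
--     if not all(visited1[1:]):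
--         return False
--
--     visited2 = dfs(1, rg)
--     if not all(visited2[1:]):
--         return False
--
--     return True
-- ===== SOURCE B (Python) =====
-- def solve(n, edges):
--     # Edge-relaxation (fixpoint) reachability instead of DFS: no adjacency lists,
--     # repeatedly propagate "reached" across edges until stable, forward then backward.
--     def reach(rev):
--         visited = [False] * (n + 1)
--         visited[1] = True
--         changed = True
--         while changed:
--             changed = False
--             for a, b in edges:
--                 s, t = (b, a) if rev else (a, b)
--                 if visited[s] and not visited[t]:
--                     visited[t] = True
--                     changed = True
--         return all(visited[1:])
--     return reach(False) and reach(True)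
-- ===== Notes on version B (the rewrite author's own statement) =====
-- stated objective: alternative
-- what changed: Replaces A's adjacency-list construction plus explicit-stack DFS (forward and on a reversed graph) by adjacency-free edge relaxation: repeatedly sweep the raw edge list, propagating the reached flag across each edge (swapped for the backward check), until a fixpoint is reached.
import Mathlib
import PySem

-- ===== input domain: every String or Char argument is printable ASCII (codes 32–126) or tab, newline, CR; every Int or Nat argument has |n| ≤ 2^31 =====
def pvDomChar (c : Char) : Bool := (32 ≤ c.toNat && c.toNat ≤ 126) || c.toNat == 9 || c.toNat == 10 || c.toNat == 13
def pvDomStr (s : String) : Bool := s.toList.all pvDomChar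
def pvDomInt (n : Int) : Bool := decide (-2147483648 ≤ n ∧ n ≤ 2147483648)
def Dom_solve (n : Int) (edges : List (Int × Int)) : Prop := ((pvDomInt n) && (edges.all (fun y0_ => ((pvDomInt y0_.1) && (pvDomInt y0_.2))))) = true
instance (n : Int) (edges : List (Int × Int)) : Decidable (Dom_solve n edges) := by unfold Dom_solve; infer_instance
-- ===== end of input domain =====

-- B replaces A's stack-based DFS over adjacency lists by edge-relaxation to a fixpoint
-- (no adjacency lists; repeated passes over the edge list), same return value (alternative).

-- ===== PORT A =====
-- A's dfs marks a neighbour and pushes it; the pySet? 'none' branch only totalises the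
-- index write where Python would raise IndexError (outside Pre_).
def dfsStep (p : List Bool × List Int) (v : Int) : List Bool × List Int :=
  if PySem.List.pyGetD p.1 v false then p
  else match PySem.List.pySet? p.1 v true with
    | some vis => (vis, p.2 ++ [v])
    | none => p

-- measure lemmas cited by dfsLoop's decreasing_by
theorem dfsStep_measure (v : Int) (p : List Bool × List Int) :
    2 * (dfsStep p v).1.count false + (dfsStep p v).2.length ≤
      2 * p.1.count false + p.2.length := by
  unfold dfsStep
  split
  · exact le_refl _
  · rename_i hget
    rcases hs : PySem.List.pySet? p.1 v true with _ | vis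
    · simp
    · simp only []
      rcases hidx : PySem.List.pyIdx? p.1.length v with _ | k
      · simp [PySem.List.pySet?, hidx] at hs
      · have hk : k < p.1.length := by
          simp only [PySem.List.pyIdx?] at hidx
          split at hidx <;> split at hidx <;> simp_all <;> omega
        have hvis : vis = p.1.set k true := by
          simp [PySem.List.pySet?, hidx] at hs; exact hs.symm
        have hval : p.1[k] = false := by
          have : PySem.List.pyGetD p.1 v false = false := by
            simpa using hget
          simp [PySem.List.pyGetD, PySem.List.pyGet?, hidx,
                List.getElem?_eq_getElem hk] at this
          exact this
        have hcnt : (p.1.set k true).count false = p.1.count false - 1 := by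
          rw [List.count_set hk]
          simp [hval]
        have hpos : 1 ≤ p.1.count false := by
          have : false ∈ p.1 := by
            have := List.getElem_mem hk; rwa [hval] at this
          simpa [List.count_pos_iff] using this
        subst hvis
        simp only [List.length_append, List.length_cons, List.length_nil]
        omega

theorem dfsFold_measure (ns : List Int) (p : List Bool × List Int) :
    2 * (ns.foldl dfsStep p).1.count false + (ns.foldl dfsStep p).2.length ≤
      2 * p.1.count false + p.2.length := by
  induction ns generalizing p with
  | nil => exact le_refl _
  | cons v ns ih => exact le_trans (ih (dfsStep p v)) (dfsStep_measure v p)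

def dfsLoop (graph : List (List Int)) (visited : List Bool) (stack : List Int) : List Bool :=
  if h : stack = [] then visited
  else
    let u := stack.getLast h
    let p := (PySem.List.pyGetD graph u []).foldl dfsStep (visited, stack.dropLast)
    dfsLoop graph p.1 p.2
termination_by 2 * visited.count false + stack.length
decreasing_by
  have h1 := dfsFold_measure (PySem.List.pyGetD graph (stack.getLast h) []) (visited, stack.dropLast)
  have h2 : stack.dropLast.length + 1 = stack.length := by
    rw [List.length_dropLast]
    have : stack.length ≠ 0 := by simpa using h
    omega
  simp only [] at h1 ⊢
  omega

def solve (n : Int) (edges : List (Int × Int)) : Bool :=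
  let L := (n + 1).toNat
  let init : List (List Int) := List.replicate L []
  let p := edges.foldl (fun (q : List (List Int) × List (List Int)) e =>
      (PySem.List.pySetD q.1 e.1 (PySem.List.pyGetD q.1 e.1 [] ++ [e.2]),
       PySem.List.pySetD q.2 e.2 (PySem.List.pyGetD q.2 e.2 [] ++ [e.1]))) (init, init)
  let visited1 := dfsLoop p.1 (PySem.List.pySetD (List.replicate L false) 1 true) [1]
  if !((PySem.List.slice visited1 (some 1) none).all id) then false
  else
    let visited2 := dfsLoop p.2 (PySem.List.pySetD (List.replicate L false) 1 true) [1]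
    if !((PySem.List.slice visited2 (some 1) none).all id) then false
    else true

-- ===== PORT B =====
-- B's relaxation of one edge; the pySet? 'none' branch only totalises the index write
-- where Python would raise IndexError (outside Pre_).
def relaxStep (rev : Bool) (p : List Bool × Bool) (e : Int × Int) : List Bool × Bool :=
  let s := if rev then e.2 else e.1
  let t := if rev then e.1 else e.2
  if PySem.List.pyGetD p.1 s false && !PySem.List.pyGetD p.1 t false then
    match PySem.List.pySet? p.1 t true with
    | some vis => (vis, true)
    | none => p
  else p

-- measure lemma cited by relaxLoop's decreasing_by
theorem relaxFold_measure (rev : Bool) (es : List (Int × Int)) (p : List Bool × Bool) :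
    ((es.foldl (relaxStep rev) p).1.count false ≤ p.1.count false) ∧
      ((es.foldl (relaxStep rev) p).2 = true →
        p.2 = true ∨ (es.foldl (relaxStep rev) p).1.count false < p.1.count false) := by
  induction es generalizing p with
  | nil => exact ⟨le_refl _, fun h => Or.inl h⟩
  | cons e es ih =>
    have key : ∀ s t : Int,
        (((if (PySem.List.pyGetD p.1 s false && !PySem.List.pyGetD p.1 t false) = true then
            match PySem.List.pySet? p.1 t true with
            | some vis => (vis, true)
            | none => p
          else p) : List Bool × Bool).1.count false ≤ p.1.count false) ∧
        (((if (PySem.List.pyGetD p.1 s false && !PySem.List.pyGetD p.1 t false) = true then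
            match PySem.List.pySet? p.1 t true with
            | some vis => (vis, true)
            | none => p
          else p) : List Bool × Bool).2 = true →
          p.2 = true ∨
            ((if (PySem.List.pyGetD p.1 s false && !PySem.List.pyGetD p.1 t false) = true then
              match PySem.List.pySet? p.1 t true with
              | some vis => (vis, true)
              | none => p
            else p) : List Bool × Bool).1.count false < p.1.count false) := by
      intro s t
      split
      · rename_i hcond
        rcases hs : PySem.List.pySet? p.1 t true with _ | vis
        · exact ⟨le_refl _, fun h => Or.inl h⟩
        · simp only []
          rcases hidx : PySem.List.pyIdx? p.1.length t with _ | k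
          · simp [PySem.List.pySet?, hidx] at hs
          · have hk : k < p.1.length := by
              simp only [PySem.List.pyIdx?] at hidx
              split at hidx <;> split at hidx <;> simp_all <;> omega
            have hvis : vis = p.1.set k true := by
              simp [PySem.List.pySet?, hidx] at hs; exact hs.symm
            have hval : p.1[k] = false := by
              have hget : PySem.List.pyGetD p.1 t false = false := by
                rcases Bool.and_eq_true .. |>.mp hcond with ⟨_, h2⟩
                simpa using h2
              simpa [PySem.List.pyGetD, PySem.List.pyGet?, hidx,
                    List.getElem?_eq_getElem hk] using hget
            have hcnt : (p.1.set k true).count false = p.1.count false - 1 := by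
              rw [List.count_set hk]; simp [hval]
            have hpos : 1 ≤ p.1.count false := by
              have : false ∈ p.1 := by
                have := List.getElem_mem hk; rwa [hval] at this
              simpa [List.count_pos_iff] using this
            subst hvis
            exact ⟨by omega, fun _ => Or.inr (by omega)⟩
      · exact ⟨le_refl _, fun h => Or.inl h⟩
    have hstep : ((relaxStep rev p e).1.count false ≤ p.1.count false) ∧
        ((relaxStep rev p e).2 = true →
          p.2 = true ∨ (relaxStep rev p e).1.count false < p.1.count false) := by
      cases rev
      · exact key e.1 e.2
      · exact key e.2 e.1
    simp only [List.foldl_cons]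
    refine ⟨le_trans (ih _).1 hstep.1, fun h => ?_⟩
    rcases (ih _).2 h with h2 | h2
    · rcases hstep.2 h2 with h3 | h3
      · exact Or.inl h3
      · exact Or.inr (lt_of_le_of_lt (ih _).1 h3)
    · exact Or.inr (lt_of_lt_of_le h2 hstep.1)

def relaxLoop (edges : List (Int × Int)) (rev : Bool) (visited : List Bool) : List Bool :=
  match hp : edges.foldl (relaxStep rev) (visited, false) with
  | (v', true) => relaxLoop edges rev v'
  | (v', false) => v'
termination_by visited.count false
decreasing_by
  have := (relaxFold_measure rev edges (visited, false)).2 (by rw [hp])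
  rw [hp] at this
  simpa using this

def reachCheck (n : Int) (edges : List (Int × Int)) (rev : Bool) : Bool :=
  let L := (n + 1).toNat
  let vf := relaxLoop edges rev (PySem.List.pySetD (List.replicate L false) 1 true)
  (PySem.List.slice vf (some 1) none).all id

def solve_alt (n : Int) (edges : List (Int × Int)) : Bool :=
  reachCheck n edges false && reachCheck n edges true

-- ===== PRECONDITION & SPEC =====
-- Pre_ is exactly where Python A returns: n ≥ 1 (else visited[1] raises IndexError) and
-- every edge endpoint a valid index of a list of length n+1 (else g[a]/rg[b] raises).
def Pre_solve (n : Int) (edges : List (Int × Int)) : Prop :=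
  1 ≤ n ∧ ∀ e ∈ edges, (-(n + 1) ≤ e.1 ∧ e.1 ≤ n) ∧ (-(n + 1) ≤ e.2 ∧ e.2 ≤ n)
instance (n : Int) (edges : List (Int × Int)) : Decidable (Pre_solve n edges) := by
  unfold Pre_solve; infer_instance

def pvWitness_solve : Int × (List (Int × Int)) := (3, [(1, 2), (2, 3), (3, 1)])

def Spec_solve (n : Int) (edges : List (Int × Int)) (out : Bool) : Prop := out = solve_alt n edges
instance (n : Int) (edges : List (Int × Int)) (out : Bool) : Decidable (Spec_solve n edges out) := by
  unfold Spec_solve; infer_instance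

-- ===== CLAIM (what is proved, stated in full; the proofs are below) =====
def Claim_equal_solve : Prop := ∀ (n : Int) (edges : List (Int × Int)),
  Dom_solve n edges → Pre_solve n edges → Spec_solve n edges (solve n edges)


-- ===== LEMMAS AND PROOFS =====

-- Python index normalisation (the value pyIdx? returns on an in-range index)
def pnorm (L : Nat) (i : Int) : Nat := if 0 ≤ i then i.toNat else L - (-i).toNat

-- one oriented edge step between normalised node indices
def EStep (L : Nat) (es : List (Int × Int)) (u v : Nat) : Prop :=
  ∃ e ∈ es, pnorm L e.1 = u ∧ pnorm L e.2 = v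

def Reach (L : Nat) (es : List (Int × Int)) (v : Nat) : Prop :=
  Relation.ReflTransGen (EStep L es) 1 v

def vget (V : List Bool) (m : Nat) : Bool := V.getD m false

def GoodE (L : Nat) (es : List (Int × Int)) : Prop :=
  ∀ e ∈ es, PySem.Raise.InRange L e.1 ∧ PySem.Raise.InRange L e.2

theorem pyIdx_of_inrange {L : Nat} {i : Int} (h : PySem.Raise.InRange L i) :
    PySem.List.pyIdx? L i = some (pnorm L i) ∧ pnorm L i < L := by
  obtain ⟨h1, h2⟩ := h
  unfold PySem.List.pyIdx? pnorm
  split_ifs <;> first | (exact ⟨rfl, by omega⟩) | omega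

theorem pyGetD_pnorm {α : Type} {L : Nat} {xs : List α} {i : Int} (d : α)
    (hL : xs.length = L) (h : PySem.Raise.InRange L i) :
    PySem.List.pyGetD xs i d = xs.getD (pnorm L i) d := by
  obtain ⟨hidx, hlt⟩ := pyIdx_of_inrange h
  simp [PySem.List.pyGetD, PySem.List.pyGet?, hL, hidx, List.getD_eq_getElem?_getD]

theorem pySet?_pnorm {α : Type} {L : Nat} {xs : List α} {i : Int} (v : α)
    (hL : xs.length = L) (h : PySem.Raise.InRange L i) :
    PySem.List.pySet? xs i v = some (xs.set (pnorm L i) v) := by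
  obtain ⟨hidx, hlt⟩ := pyIdx_of_inrange h
  simp [PySem.List.pySet?, hL, hidx]

theorem pySetD_pnorm {α : Type} {L : Nat} {xs : List α} {i : Int} (v : α)
    (hL : xs.length = L) (h : PySem.Raise.InRange L i) :
    PySem.List.pySetD xs i v = xs.set (pnorm L i) v := by
  simp [PySem.List.pySetD, pySet?_pnorm v hL h]

theorem vget_set_self {V : List Bool} {m : Nat} (b : Bool) (hm : m < V.length) :
    vget (V.set m b) m = b := by
  simp [vget, List.getD_eq_getElem?_getD, List.getElem?_set, hm]

theorem vget_set_ne {V : List Bool} {m m' : Nat} (b : Bool) (hne : m ≠ m') :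
    vget (V.set m b) m' = vget V m' := by
  simp [vget, List.getD_eq_getElem?_getD, List.getElem?_set, hne]

theorem vget_set_mono {V : List Bool} {k m : Nat} (h : vget V m = true) :
    vget (V.set k true) m = true := by
  by_cases hk : k = m
  · subst hk
    by_cases hlt : k < V.length
    · simp [vget_set_self _ hlt]
    · rw [List.set_eq_of_length_le (Nat.le_of_not_lt hlt)]; exact h
  · rw [vget_set_ne _ hk]; exact h

theorem vget_replicate (L m : Nat) : vget (List.replicate L false) m = false := by
  simp only [vget, List.getD_eq_getElem?_getD, List.getElem?_replicate]
  split <;> rfl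

theorem pnorm_one (L : Nat) : pnorm L 1 = 1 := by simp [pnorm]

-- ---------- graph building (port A) ----------

def buildF : List (List Int) → (Int × Int) → List (List Int) := fun G e =>
  PySem.List.pySetD G e.1 (PySem.List.pyGetD G e.1 [] ++ [e.2])

def buildR : List (List Int) → (Int × Int) → List (List Int) := fun G e =>
  PySem.List.pySetD G e.2 (PySem.List.pyGetD G e.2 [] ++ [e.1])

def GraphOK (L : Nat) (es : List (Int × Int)) (G : List (List Int)) : Prop :=
  G.length = L ∧
  (∀ m, ∀ v ∈ G.getD m [], ∃ e ∈ es, pnorm L e.1 = m ∧ e.2 = v) ∧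
  (∀ e ∈ es, e.2 ∈ G.getD (pnorm L e.1) [])

theorem buildFold_mem {L : Nat} (rest : List (Int × Int)) :
    ∀ (G : List (List Int)), G.length = L → GoodE L rest →
    (rest.foldl buildF G).length = L ∧
    (∀ (m : Nat) (v : Int), v ∈ (rest.foldl buildF G).getD m [] ↔
      v ∈ G.getD m [] ∨ ∃ e ∈ rest, pnorm L e.1 = m ∧ e.2 = v) := by
  induction rest with
  | nil => intro G hG _; exact ⟨hG, by simp⟩
  | cons e rest ih =>
    intro G hG hgood
    have he : PySem.Raise.InRange L e.1 := (hgood e (by simp)).1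
    have hk : pnorm L e.1 < L := (pyIdx_of_inrange he).2
    have hstep : buildF G e = G.set (pnorm L e.1) (G.getD (pnorm L e.1) [] ++ [e.2]) := by
      simp [buildF, pySetD_pnorm _ hG he, pyGetD_pnorm _ hG he]
    have hlen' : (buildF G e).length = L := by rw [hstep]; simpa using hG
    have hgood' : GoodE L rest := fun e' he' => hgood e' (by simp [he'])
    obtain ⟨hl, hmem⟩ := ih (buildF G e) hlen' hgood'
    refine ⟨by simpa using hl, ?_⟩
    intro m v
    rw [List.foldl_cons, hmem m v]
    have hget : (buildF G e).getD m [] =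
        if pnorm L e.1 = m then G.getD m [] ++ [e.2] else G.getD m [] := by
      rw [hstep]
      by_cases hm : pnorm L e.1 = m
      · subst hm
        simp [List.getD_eq_getElem?_getD, List.getElem?_set, hG, hk]
      · simp [List.getD_eq_getElem?_getD, List.getElem?_set, hm]
    constructor
    · rintro (hv | hv)
      · rw [hget] at hv
        split at hv
        · rcases List.mem_append.mp hv with hv | hv
          · exact Or.inl hv
          · simp at hv
            exact Or.inr ⟨e, by simp, by tauto⟩
        · exact Or.inl hv
      · obtain ⟨e', he', h1, h2⟩ := hv
        exact Or.inr ⟨e', by simp [he'], h1, h2⟩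
    · rintro (hv | hv)
      · refine Or.inl ?_
        rw [hget]
        split
        · exact List.mem_append.mpr (Or.inl hv)
        · exact hv
      · obtain ⟨e', he', h1, h2⟩ := hv
        rcases List.mem_cons.mp he' with rfl | he'
        · refine Or.inl ?_
          rw [hget, if_pos h1]
          simp [h2]
        · exact Or.inr ⟨e', he', h1, h2⟩

theorem build_graphOK {L : Nat} {es : List (Int × Int)} (hes : GoodE L es) :
    GraphOK L es (es.foldl buildF (List.replicate L [])) := by
  obtain ⟨hl, hmem⟩ := buildFold_mem es (List.replicate L []) (by simp) hes
  refine ⟨hl, ?_, ?_⟩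
  · intro m v hv
    rcases (hmem m v).mp hv with h | h
    · exfalso
      rcases Nat.lt_or_ge m L with hm | hm
      · simp [List.getD_eq_getElem?_getD, List.getElem?_replicate, hm] at h
      · simp [List.getD_eq_getElem?_getD, List.getElem?_replicate,
              Nat.not_lt.mpr hm] at h
    · exact h
  · intro e he
    exact (hmem (pnorm L e.1) e.2).mpr (Or.inr ⟨e, he, rfl, rfl⟩)

-- ---------- DFS loop (port A) ----------

theorem dfsStep_len (p : List Bool × List Int) (v : Int) :
    (dfsStep p v).1.length = p.1.length := by
  unfold dfsStep
  split
  · rfl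
  · rcases hs : PySem.List.pySet? p.1 v true with _ | vis
    · rfl
    · simp only []
      rcases hidx : PySem.List.pyIdx? p.1.length v with _ | k
      · simp [PySem.List.pySet?, hidx] at hs
      · have : vis = p.1.set k true := by
          simp [PySem.List.pySet?, hidx] at hs; exact hs.symm
        simp [this]

def DfsInv (L : Nat) (es : List (Int × Int)) (V : List Bool) (S : List Int) : Prop :=
  V.length = L ∧ vget V 1 = true ∧
  (∀ s ∈ S, PySem.Raise.InRange L s ∧ vget V (pnorm L s) = true) ∧
  (∀ m, vget V m = true → Reach L es m) ∧
  (∀ m, vget V m = true →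
    (∃ s ∈ S, pnorm L s = m) ∨ ∀ w, EStep L es m w → vget V w = true)

theorem dfsFold_props {L : Nat} (ns : List Int) :
    ∀ (V : List Bool) (S : List Int), V.length = L →
    (∀ v ∈ ns, PySem.Raise.InRange L v) →
    (∀ m, vget V m = true → vget (ns.foldl dfsStep (V, S)).1 m = true) ∧
    (∀ m, vget (ns.foldl dfsStep (V, S)).1 m = true →
      vget V m = true ∨ ∃ v ∈ ns, pnorm L v = m) ∧
    (∀ m, vget (ns.foldl dfsStep (V, S)).1 m = true →
      vget V m = true ∨ ∃ s ∈ (ns.foldl dfsStep (V, S)).2, pnorm L s = m) ∧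
    (∀ s ∈ S, s ∈ (ns.foldl dfsStep (V, S)).2) ∧
    (∀ s ∈ (ns.foldl dfsStep (V, S)).2, s ∈ S ∨ s ∈ ns) ∧
    (∀ v ∈ ns, vget (ns.foldl dfsStep (V, S)).1 (pnorm L v) = true) := by
  induction ns with
  | nil =>
    intro V S _ _
    exact ⟨fun m h => h, fun m h => Or.inl h, fun m h => Or.inl h,
      fun s hs => hs, fun s hs => Or.inl hs, by simp⟩
  | cons v ns ih =>
    intro V S hLV hns
    have hv : PySem.Raise.InRange L v := hns v (by simp)
    have hvlt : pnorm L v < L := (pyIdx_of_inrange hv).2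
    have hns' : ∀ w ∈ ns, PySem.Raise.InRange L w := fun w hw => hns w (by simp [hw])
    have hmark : PySem.List.pyGetD V v false = vget V (pnorm L v) := by
      rw [pyGetD_pnorm _ hLV hv]; rfl
    rw [List.foldl_cons]
    by_cases hm : vget V (pnorm L v) = true
    · have hstep : dfsStep (V, S) v = (V, S) := by
        unfold dfsStep; rw [if_pos (by rw [hmark]; exact hm)]
      rw [hstep]
      obtain ⟨mono, c1, c2, sub, sup, fmk⟩ := ih V S hLV hns'
      refine ⟨mono, ?_, ?_, sub, ?_, ?_⟩
      · intro m h
        rcases c1 m h with h | ⟨w, hw, hh⟩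
        · exact Or.inl h
        · exact Or.inr ⟨w, by simp [hw], hh⟩
      · exact c2
      · intro s hs
        rcases sup s hs with h | h
        · exact Or.inl h
        · exact Or.inr (by simp [h])
      · intro w hw
        rcases List.mem_cons.mp hw with rfl | hw
        · exact mono _ hm
        · exact fmk w hw
    · have hstep : dfsStep (V, S) v = (V.set (pnorm L v) true, S ++ [v]) := by
        unfold dfsStep
        rw [if_neg (by rw [hmark]; simpa using hm), pySet?_pnorm _ hLV hv]
      rw [hstep]
      have hLV1 : (V.set (pnorm L v) true).length = L := by simpa using hLV
      obtain ⟨mono, c1, c2, sub, sup, fmk⟩ := ih (V.set (pnorm L v) true) (S ++ [v]) hLV1 hns'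
      have hvq : v ∈ (ns.foldl dfsStep (V.set (pnorm L v) true, S ++ [v])).2 :=
        sub v (by simp)
      refine ⟨?_, ?_, ?_, ?_, ?_, ?_⟩
      · intro m h; exact mono m (vget_set_mono h)
      · intro m h
        rcases c1 m h with h | ⟨w, hw, hh⟩
        · by_cases hh : pnorm L v = m
          · exact Or.inr ⟨v, by simp, hh⟩
          · rw [vget_set_ne _ hh] at h; exact Or.inl h
        · exact Or.inr ⟨w, by simp [hw], hh⟩
      · intro m h
        rcases c2 m h with h | ⟨s, hs, hh⟩
        · by_cases hh : pnorm L v = m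
          · exact Or.inr ⟨v, hvq, hh⟩
          · rw [vget_set_ne _ hh] at h; exact Or.inl h
        · exact Or.inr ⟨s, hs, hh⟩
      · intro s hs; exact sub s (by simp [hs])
      · intro s hs
        rcases sup s hs with h | h
        · rcases List.mem_append.mp h with h | h
          · exact Or.inl h
          · simp at h; exact Or.inr (by simp [h])
        · exact Or.inr (by simp [h])
      · intro w hw
        rcases List.mem_cons.mp hw with rfl | hw
        · exact mono _ (vget_set_self true (by omega))
        · exact fmk w hw

theorem dfsFoldl_len (ms : List Int) :
    ∀ (q : List Bool × List Int), (ms.foldl dfsStep q).1.length = q.1.length := by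
  induction ms with
  | nil => intro q; rfl
  | cons w ms ihm => intro q; rw [List.foldl_cons, ihm, dfsStep_len]

theorem dfsLoop_char {L : Nat} {es : List (Int × Int)} {G : List (List Int)}
    (hes : GoodE L es) (hG : GraphOK L es G) :
    ∀ (V : List Bool) (S : List Int), DfsInv L es V S →
      ∀ m, vget (dfsLoop G V S) m = true ↔ Reach L es m := by
  intro V S
  fun_induction dfsLoop G V S with
  | case1 V =>
    intro hInv m
    obtain ⟨hLV, hv1, hstk, hsound, hclo⟩ := hInv
    constructor
    · exact hsound m
    · intro hR
      induction hR with
      | refl => exact hv1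
      | tail hab hstep ihm =>
        rcases hclo _ ihm with ⟨s, hs, _⟩ | hcl
        · simp at hs
        · exact hcl _ hstep
  | case2 V S h u p IH =>
    intro hInv
    obtain ⟨hLV, hv1, hstk, hsound, hclo⟩ := hInv
    have hu : u ∈ S := List.getLast_mem h
    obtain ⟨hur, hum⟩ := hstk u hu
    have hns_eq : PySem.List.pyGetD G u [] = G.getD (pnorm L u) [] :=
      pyGetD_pnorm _ hG.1 hur
    have hnsE : ∀ v ∈ PySem.List.pyGetD G u [],
        ∃ e ∈ es, pnorm L e.1 = pnorm L u ∧ e.2 = v := by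
      rw [hns_eq]; exact hG.2.1 (pnorm L u)
    have hns : ∀ v ∈ PySem.List.pyGetD G u [], PySem.Raise.InRange L v := by
      intro v hv
      obtain ⟨e, he, _, h2⟩ := hnsE v hv
      subst h2
      exact (hes e he).2
    obtain ⟨mono, c1, c2, sub, sup, fmk⟩ :=
      dfsFold_props (PySem.List.pyGetD G u []) V S.dropLast hLV hns
    have hplen : p.1.length = L := by
      rw [show p = ((PySem.List.pyGetD G u []).foldl dfsStep (V, S.dropLast)) from rfl,
        dfsFoldl_len, hLV]
    apply IH
    refine ⟨hplen, mono _ hv1, ?_, ?_, ?_⟩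
    · intro s hs
      rcases sup s hs with hsr | hsn
      · have hsS : s ∈ S := List.mem_of_mem_dropLast hsr
        obtain ⟨h1, h2⟩ := hstk s hsS
        exact ⟨h1, mono _ h2⟩
      · exact ⟨hns s hsn, fmk s hsn⟩
    · intro m hm
      rcases c1 m hm with hm | ⟨v, hv, rfl⟩
      · exact hsound m hm
      · obtain ⟨e, he, h1, h2⟩ := hnsE v hv
        exact Relation.ReflTransGen.tail (hsound _ hum)
          ⟨e, he, h1, by rw [h2]⟩
    · intro m hm
      rcases c2 m hm with hm | ⟨s, hs, hh⟩
      · rcases hclo m hm with ⟨s, hs, hh⟩ | hcl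
        · have hsplit : s ∈ S.dropLast ∨ s = u := by
            have := List.dropLast_concat_getLast h
            have hmem : s ∈ S.dropLast ++ [S.getLast h] := by rw [this]; exact hs
            rcases List.mem_append.mp hmem with h1 | h1
            · exact Or.inl h1
            · simp at h1; exact Or.inr h1
          rcases hsplit with h1 | rfl
          · exact Or.inl ⟨s, sub s h1, hh⟩
          · refine Or.inr ?_
            intro w hw
            obtain ⟨e, he, he1, he2⟩ := hw
            have : e.2 ∈ PySem.List.pyGetD G u [] := by
              rw [hns_eq]
              have := hG.2.2 e he
              rwa [he1, ← hh] at this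
            rw [← he2]
            exact fmk e.2 this
        · exact Or.inr fun w hw => mono w (hcl w hw)
      · exact Or.inl ⟨s, hs, hh⟩

theorem dfsLoop_len {G : List (List Int)} (V : List Bool) (S : List Int) :
    (dfsLoop G V S).length = V.length := by
  fun_induction dfsLoop G V S with
  | case1 => rfl
  | case2 V S h u p IH => rw [IH]; exact dfsFoldl_len _ _

-- ---------- relaxation loop (port B) ----------

theorem pySet?_len {α : Type} {xs ys : List α} {i : Int} {v : α}
    (h : PySem.List.pySet? xs i v = some ys) : ys.length = xs.length := by
  rcases hidx : PySem.List.pyIdx? xs.length i with _ | k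
  · simp [PySem.List.pySet?, hidx] at h
  · simp [PySem.List.pySet?, hidx] at h
    rw [← h]
    simp

theorem relaxStep_false_eq {L : Nat} {p : List Bool × Bool} {e : Int × Int}
    (hL : p.1.length = L) (h1 : PySem.Raise.InRange L e.1) (h2 : PySem.Raise.InRange L e.2) :
    relaxStep false p e =
      if (vget p.1 (pnorm L e.1) && !(vget p.1 (pnorm L e.2))) = true then
        (p.1.set (pnorm L e.2) true, true)
      else p := by
  have g1 : PySem.List.pyGetD p.1 e.1 false = vget p.1 (pnorm L e.1) := by
    rw [pyGetD_pnorm _ hL h1]; rfl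
  have g2 : PySem.List.pyGetD p.1 e.2 false = vget p.1 (pnorm L e.2) := by
    rw [pyGetD_pnorm _ hL h2]; rfl
  show (if (PySem.List.pyGetD p.1 e.1 false && !PySem.List.pyGetD p.1 e.2 false) = true then
        match PySem.List.pySet? p.1 e.2 true with
        | some vis => (vis, true)
        | none => p
      else p) = _
  rw [g1, g2, pySet?_pnorm true hL h2]

theorem rlxFold_props {L : Nat} (fs : List (Int × Int)) :
    ∀ (todo : List (Int × Int)), (∀ e ∈ todo, e ∈ fs) → GoodE L todo →
    ∀ (p : List Bool × Bool), p.1.length = L →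
    (todo.foldl (relaxStep false) p).1.length = L ∧
    (∀ m, vget p.1 m = true → vget (todo.foldl (relaxStep false) p).1 m = true) ∧
    ((∀ m, vget p.1 m = true → Reach L fs m) →
      ∀ m, vget (todo.foldl (relaxStep false) p).1 m = true → Reach L fs m) ∧
    (p.2 = true → (todo.foldl (relaxStep false) p).2 = true) ∧
    ((todo.foldl (relaxStep false) p).2 = false →
      (todo.foldl (relaxStep false) p).1 = p.1 ∧
      ∀ e ∈ todo, vget p.1 (pnorm L e.1) = true → vget p.1 (pnorm L e.2) = true) := by
  intro todo
  induction todo with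
  | nil =>
    intro _ _ p hL
    exact ⟨hL, fun m h => h, fun hS m h => hS m h, fun h => h,
      fun _ => ⟨rfl, by simp⟩⟩
  | cons e todo ih =>
    intro hsub hgood p hL
    have he1 : PySem.Raise.InRange L e.1 := (hgood e (by simp)).1
    have he2 : PySem.Raise.InRange L e.2 := (hgood e (by simp)).2
    have hefs : e ∈ fs := hsub e (by simp)
    have hsub' : ∀ e' ∈ todo, e' ∈ fs := fun e' h => hsub e' (by simp [h])
    have hgood' : GoodE L todo := fun e' h => hgood e' (by simp [h])
    have hstep := relaxStep_false_eq (p := p) (e := e) hL he1 he2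
    rw [List.foldl_cons, hstep]
    by_cases hc : (vget p.1 (pnorm L e.1) && !(vget p.1 (pnorm L e.2))) = true
    · rw [if_pos hc]
      have hc1 : vget p.1 (pnorm L e.1) = true := (Bool.and_eq_true .. |>.mp hc).1
      have hL' : (p.1.set (pnorm L e.2) true).length = L := by simpa using hL
      obtain ⟨l1, l2, l3, l4, l5⟩ :=
        ih hsub' hgood' (p.1.set (pnorm L e.2) true, true) hL'
      refine ⟨l1, ?_, ?_, fun _ => l4 rfl, ?_⟩
      · intro m h; exact l2 m (vget_set_mono h)
      · intro hS m h
        refine l3 ?_ m h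
        intro m' hm'
        by_cases hm2 : pnorm L e.2 = m'
        · subst hm2
          exact Relation.ReflTransGen.tail (hS _ hc1) ⟨e, hefs, rfl, rfl⟩
        · rw [vget_set_ne _ hm2] at hm'
          exact hS m' hm'
      · intro hflag
        exact absurd (l4 rfl) (by simp [hflag])
    · rw [if_neg hc]
      obtain ⟨l1, l2, l3, l4, l5⟩ := ih hsub' hgood' p hL
      refine ⟨l1, l2, l3, l4, ?_⟩
      intro hflag
      obtain ⟨hfix, hclosed⟩ := l5 hflag
      refine ⟨hfix, ?_⟩
      intro e' he'
      rcases List.mem_cons.mp he' with heq | he'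
      · intro h1
        rw [heq] at h1 ⊢
        simp only [Bool.and_eq_true, Bool.not_eq_true'] at hc
        cases hb : vget p.1 (pnorm L e.2) with
        | false => exact absurd ⟨h1, hb⟩ hc
        | true => rfl
      · exact hclosed e' he'

theorem relaxStep_len (rev : Bool) (p : List Bool × Bool) (e : Int × Int) :
    (relaxStep rev p e).1.length = p.1.length := by
  have key : ∀ t s : Int,
      (((if (PySem.List.pyGetD p.1 s false && !PySem.List.pyGetD p.1 t false) = true then
          match PySem.List.pySet? p.1 t true with
          | some vis => (vis, true)
          | none => p
        else p) : List Bool × Bool)).1.length = p.1.length := by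
    intro t s
    split
    · rcases hs : PySem.List.pySet? p.1 t true with _ | vis
      · rfl
      · simpa using pySet?_len hs
    · rfl
  cases rev
  · exact key e.2 e.1
  · exact key e.1 e.2

theorem rlxFoldl_len (rev : Bool) (es : List (Int × Int)) :
    ∀ (p : List Bool × Bool), (es.foldl (relaxStep rev) p).1.length = p.1.length := by
  induction es with
  | nil => intro p; rfl
  | cons e es ih => intro p; rw [List.foldl_cons, ih, relaxStep_len]

theorem relaxLoop_len (es : List (Int × Int)) (rev : Bool) (V : List Bool) :
    (relaxLoop es rev V).length = V.length := by
  fun_induction relaxLoop es rev V with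
  | case1 V v' hp IH =>
    rw [IH]
    have := rlxFoldl_len rev es (V, false)
    rw [hp] at this
    exact this
  | case2 V v' hp =>
    have := rlxFoldl_len rev es (V, false)
    rw [hp] at this
    exact this

def sw (e : Int × Int) : Int × Int := (e.2, e.1)

def orient (rev : Bool) (es : List (Int × Int)) : List (Int × Int) :=
  if rev then es.map sw else es

theorem foldl_relax_orient (rev : Bool) (todo : List (Int × Int)) (p : List Bool × Bool) :
    todo.foldl (relaxStep rev) p = (orient rev todo).foldl (relaxStep false) p := by
  cases rev
  · rfl
  · show _ = (todo.map sw).foldl (relaxStep false) p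
    rw [List.foldl_map]
    rfl

theorem relaxLoop_char {L : Nat} (rev : Bool) (es : List (Int × Int))
    (hgood : GoodE L (orient rev es)) :
    ∀ (V : List Bool), V.length = L → vget V 1 = true →
      (∀ m, vget V m = true → Reach L (orient rev es) m) →
      ∀ m, vget (relaxLoop es rev V) m = true ↔ Reach L (orient rev es) m := by
  intro V
  fun_induction relaxLoop es rev V with
  | case1 V v' hp IH =>
    intro hL h1 hS
    rw [foldl_relax_orient] at hp
    obtain ⟨l1, l2, l3, _, _⟩ :=
      rlxFold_props (orient rev es) (orient rev es) (fun e h => h) hgood (V, false) hL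
    rw [hp] at l1 l2 l3
    exact IH l1 (l2 _ h1) (l3 hS)
  | case2 V v' hp =>
    intro hL h1 hS m
    rw [foldl_relax_orient] at hp
    obtain ⟨_, _, _, _, l5⟩ :=
      rlxFold_props (orient rev es) (orient rev es) (fun e h => h) hgood (V, false) hL
    rw [hp] at l5
    obtain ⟨hfix, hclosed⟩ := l5 rfl
    simp only at hfix
    subst hfix
    constructor
    · exact hS m
    · intro hR
      induction hR with
      | refl => exact h1
      | tail hab hstep ihm =>
        obtain ⟨e, he, he1, he2⟩ := hstep
        rw [← he2]
        exact hclosed e he (by rw [he1]; exact ihm)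

-- ---------- final assembly ----------

theorem bool_eq_of_iff {a b : Bool} (h : a = true ↔ b = true) : a = b := by
  cases a <;> cases b <;> simp_all

theorem vget_eq_getElem {V : List Bool} {k : Nat} (hk : k < V.length) :
    vget V k = V[k] := by
  simp [vget, List.getD_eq_getElem?_getD, List.getElem?_eq_getElem hk]

theorem if_chain_and (x y : Bool) :
    (if !x then false else if !y then false else true) = (x && y) := by
  cases x <;> cases y <;> rfl

-- ===== VERDICT (by name: the statement is the Claim_ definition above) =====
theorem solve_spec : Claim_equal_solve := by
  unfold Claim_equal_solve
  intro n edges _ hpre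
  unfold Spec_solve
  obtain ⟨hn, hed⟩ := hpre
  set L := (n + 1).toNat with hLdef
  have hcast : (L : Int) = n + 1 := by omega
  have hL2 : 2 ≤ L := by omega
  have hes : GoodE L edges := by
    intro e he
    obtain ⟨⟨a1, a2⟩, b1, b2⟩ := hed e he
    refine ⟨⟨?_, ?_⟩, ?_, ?_⟩ <;> omega
  have hesw : GoodE L (edges.map sw) := by
    intro e he
    rw [List.mem_map] at he
    obtain ⟨e', he', rfl⟩ := he
    exact ⟨(hes e' he').2, (hes e' he').1⟩
  have hIn1 : PySem.Raise.InRange L 1 := ⟨by omega, by omega⟩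
  set V0 := PySem.List.pySetD (List.replicate L false) 1 true with hV0
  have hV0eq : V0 = (List.replicate L false).set 1 true := by
    rw [hV0, pySetD_pnorm _ (by simp) hIn1, pnorm_one]
  have hV0len : V0.length = L := by rw [hV0eq]; simp
  have hV0get1 : vget V0 1 = true := by
    rw [hV0eq]; exact vget_set_self _ (by simp; omega)
  have hV0only : ∀ m, vget V0 m = true → m = 1 := by
    intro m hm
    by_contra hne
    rw [hV0eq, vget_set_ne _ (fun h => hne h.symm), vget_replicate] at hm
    cases hm
  have hInv0 : ∀ es, DfsInv L es V0 [1] := by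
    intro es
    refine ⟨hV0len, hV0get1, ?_, ?_, ?_⟩
    · intro s hs
      simp at hs
      subst hs
      exact ⟨hIn1, by rw [pnorm_one]; exact hV0get1⟩
    · intro m hm
      rw [hV0only m hm]
      exact Relation.ReflTransGen.refl
    · intro m hm
      exact Or.inl ⟨1, by simp, by rw [pnorm_one]; exact (hV0only m hm).symm⟩
  set Gf := edges.foldl buildF (List.replicate L []) with hGfdef
  set Gr := (edges.map sw).foldl buildF (List.replicate L []) with hGrdef
  have hGf : GraphOK L edges Gf := build_graphOK hes
  have hGr : GraphOK L (edges.map sw) Gr := build_graphOK hesw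
  have hRlxInit : ∀ fs, (∀ m, vget V0 m = true → Reach L fs m) := by
    intro fs m hm
    rw [hV0only m hm]
    exact Relation.ReflTransGen.refl
  have hEqF : dfsLoop Gf V0 [1] = relaxLoop edges false V0 := by
    apply List.ext_getElem
      (by rw [dfsLoop_len, relaxLoop_len])
    intro k h1 h2
    rw [← vget_eq_getElem h1, ← vget_eq_getElem h2]
    exact bool_eq_of_iff
      ((dfsLoop_char hes hGf V0 [1] (hInv0 _) k).trans
        (relaxLoop_char false edges hes V0 hV0len hV0get1 (hRlxInit _) k).symm)
  have hEqR : dfsLoop Gr V0 [1] = relaxLoop edges true V0 := by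
    apply List.ext_getElem
      (by rw [dfsLoop_len, relaxLoop_len])
    intro k h1 h2
    rw [← vget_eq_getElem h1, ← vget_eq_getElem h2]
    exact bool_eq_of_iff
      ((dfsLoop_char hesw hGr V0 [1] (hInv0 _) k).trans
        (relaxLoop_char true edges hesw V0 hV0len hV0get1 (hRlxInit _) k).symm)
  have hpair : edges.foldl (fun (q : List (List Int) × List (List Int)) e =>
      (PySem.List.pySetD q.1 e.1 (PySem.List.pyGetD q.1 e.1 [] ++ [e.2]),
       PySem.List.pySetD q.2 e.2 (PySem.List.pyGetD q.2 e.2 [] ++ [e.1])))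
      (List.replicate L [], List.replicate L []) = (Gf, Gr) := by
    have hfun : (fun (q : List (List Int) × List (List Int)) e =>
        (PySem.List.pySetD q.1 e.1 (PySem.List.pyGetD q.1 e.1 [] ++ [e.2]),
         PySem.List.pySetD q.2 e.2 (PySem.List.pyGetD q.2 e.2 [] ++ [e.1]))) =
        (fun (q : List (List Int) × List (List Int)) e =>
          (buildF q.1 e, buildR q.2 e)) := rfl
    rw [hfun, PySem.List.foldl_prod_mk]
    have h2 : (edges.map sw).foldl buildF (List.replicate L ([] : List Int)) =
        edges.foldl buildR (List.replicate L []) := by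
      rw [List.foldl_map]; rfl
    rw [hGfdef, hGrdef, h2]
  simp only [solve, solve_alt, reachCheck]
  rw [← hLdef, ← hV0, hpair, hEqF, hEqR, if_chain_and]
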